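-- pv_equiv track=rewrite | github.com/DarkichJs/Eolymp | Tasks/Plastic Balance/main.py | plastic_balance
-- ===== SOURCE A (Python) =====
-- def plastic_balance(lst):
--     while len(lst) >= 2:
--         if((lst[0] + lst[-1] != sum(lst[1:-1]) )):
--             lst.pop(0)
--             lst.pop(-1)
--         else:
--              break
--     if(len(lst) == 1):
--             if(lst[0] + lst[0] != 0):
--                 lst.pop(0)
--     return lst
-- ===== SOURCE B (Python) =====
-- def plastic_balance(lst):
--     # Two pointers with an incremental total: O(n) instead of A's O(n^2).
--     # Return-value equivalence only: A mutates its argument in place, B does not.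
--     s = sum(lst)
--     i, j = 0, len(lst) - 1
--     while i < j and s != 2 * (lst[i] + lst[j]):
--         s -= lst[i] + lst[j]
--         i += 1
--         j -= 1
--     if i == j and lst[i] != 0:
--         return []
--     return lst[i:j + 1]
-- ===== Notes on version B (the rewrite author's own statement) =====
-- stated objective: faster
-- what changed: Replaced the pop-both-ends loop that recomputes sum(lst[1:-1]) each iteration with a two-pointer scan maintaining the total incrementally, returning one final slice.
import Mathlib
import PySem

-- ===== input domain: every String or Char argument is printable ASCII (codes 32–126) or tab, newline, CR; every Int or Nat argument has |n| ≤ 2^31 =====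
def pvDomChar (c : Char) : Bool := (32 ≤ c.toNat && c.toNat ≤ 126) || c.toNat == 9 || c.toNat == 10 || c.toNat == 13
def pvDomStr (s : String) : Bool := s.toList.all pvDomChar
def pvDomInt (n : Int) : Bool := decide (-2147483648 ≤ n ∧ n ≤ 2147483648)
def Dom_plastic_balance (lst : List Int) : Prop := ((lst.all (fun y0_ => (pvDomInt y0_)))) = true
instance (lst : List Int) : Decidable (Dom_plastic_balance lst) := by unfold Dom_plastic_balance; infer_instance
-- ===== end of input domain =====

-- B replaces A's pop-both-ends loop (which re-sums the middle every iteration) by a two-pointer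
-- scan maintaining the total incrementally; equivalence is about the RETURN value only
-- (Python A mutates its argument in place, B does not).

-- ===== PORT A =====
-- A's while-loop: while len(lst) >= 2: if lst[0]+lst[-1] != sum(lst[1:-1]): pop(0); pop(-1) else break.
-- lst.pop(0) then lst.pop(-1) on a list of length >= 2 is exactly tail then dropLast (no IndexError possible).
def pbTrim (lst : List Int) : List Int :=
  if _h : 2 ≤ lst.length then
    if PySem.List.pyGetD lst 0 0 + PySem.List.pyGetD lst (-1) 0
        ≠ (PySem.List.slice lst (some 1) (some (-1))).sum then
      pbTrim lst.tail.dropLast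
    else lst
  else lst
termination_by lst.length
decreasing_by simp [List.length_dropLast, List.length_tail]; omega

def plastic_balance (lst : List Int) : List Int :=
  let r := pbTrim lst
  if r.length = 1 then
    if PySem.List.pyGetD r 0 0 + PySem.List.pyGetD r 0 0 ≠ 0 then r.tail else r
  else r

-- ===== PORT B =====
-- B's while-loop: two pointers i, j and the running total s of lst[i..j].
def pbAltLoop (lst : List Int) (s : Int) (i j : Int) : Int × Int :=
  if _h : i < j ∧ s ≠ 2 * (PySem.List.pyGetD lst i 0 + PySem.List.pyGetD lst j 0) then
    pbAltLoop lst (s - (PySem.List.pyGetD lst i 0 + PySem.List.pyGetD lst j 0)) (i + 1) (j - 1)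
  else (i, j)
termination_by (j - i).toNat
decreasing_by omega

def plastic_balance_alt (lst : List Int) : List Int :=
  let s := lst.sum
  let p := pbAltLoop lst s 0 ((lst.length : Int) - 1)
  if p.1 = p.2 ∧ PySem.List.pyGetD lst p.1 0 ≠ 0 then []
  else PySem.List.slice lst (some p.1) (some (p.2 + 1))

-- ===== PRECONDITION & SPEC =====
def Spec_plastic_balance (lst : List Int) (out : List Int) : Prop := out = plastic_balance_alt lst
instance (lst : List Int) (out : List Int) : Decidable (Spec_plastic_balance lst out) := by unfold Spec_plastic_balance; infer_instance

-- ===== CLAIM (what is proved, stated in full; the proofs are below) =====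
def Claim_equal_plastic_balance : Prop := ∀ (lst : List Int), Dom_plastic_balance lst → Spec_plastic_balance lst (plastic_balance lst)

-- ===== LEMMAS AND PROOFS =====

-- B's finishing step, factored out for the lockstep lemma.
def pbFinish (lst : List Int) (i j : Int) : List Int :=
  if i = j ∧ PySem.List.pyGetD lst i 0 ≠ 0 then []
  else PySem.List.slice lst (some i) (some (j + 1))

-- xs[1:-1] is tail-then-dropLast (what A's two pops perform).
lemma slice_one_neg_one (xs : List Int) :
    PySem.List.slice xs (some 1) (some (-1)) = xs.tail.dropLast := by
  simp [PySem.List.slice, PySem.List.clampIdx]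
  rcases xs with _ | ⟨x, t⟩
  · simp
  · simp [List.dropLast_eq_take]

-- lst[i:j+1] = lst[i] :: lst[i+1:j] ++ [lst[j]] for 0 ≤ i < j < len.
lemma slice_decomp (lst : List Int) (i j : Int) (h0 : 0 ≤ i) (hij : i < j)
    (hj : j < (lst.length : Int)) :
    PySem.List.slice lst (some i) (some (j + 1)) =
      PySem.List.pyGetD lst i 0 ::
        (PySem.List.slice lst (some (i + 1)) (some j) ++ [PySem.List.pyGetD lst j 0]) := by
  rw [PySem.List.slice_toNat lst h0 (by omega), PySem.List.slice_toNat lst (by omega) (by omega)]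
  rw [PySem.List.pyGetD_eq_getElem lst 0 h0 (by omega), PySem.List.pyGetD_eq_getElem lst 0 (by omega) hj]
  have ha : i.toNat < lst.length := by omega
  rw [List.drop_eq_getElem_cons ha]
  have h1 : (j+1).toNat - i.toNat = (j.toNat - (i+1).toNat) + 1 + 1 := by omega
  rw [h1, List.take_succ_cons]
  have h2 : (i+1).toNat = i.toNat + 1 := by omega
  rw [h2, List.take_add_one]
  congr 1
  rw [List.getElem?_drop]
  have h3 : i.toNat + 1 + (j.toNat - (i.toNat + 1)) = j.toNat := by omega
  rw [h3, List.getElem?_eq_getElem (by omega : j.toNat < lst.length)]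
  simp

lemma slice_singleton (lst : List Int) (i : Int) (h0 : 0 ≤ i) (hi : i < (lst.length : Int)) :
    PySem.List.slice lst (some i) (some (i + 1)) = [PySem.List.pyGetD lst i 0] := by
  rw [PySem.List.slice_toNat lst h0 (by omega)]
  have h1 : (i+1).toNat - i.toNat = 1 := by omega
  rw [h1, PySem.List.pyGetD_eq_getElem lst 0 h0 hi]
  rw [List.take_one, List.head?_drop]
  simp [List.getElem?_eq_getElem (by omega : i.toNat < lst.length)]

lemma slice_empty (lst : List Int) (i : Int) (h0 : 0 ≤ i) :
    PySem.List.slice lst (some i) (some i) = [] := by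
  rw [PySem.List.slice_toNat lst h0 h0]; simp

-- Lockstep invariant: on the segment lst[i..j] (with running sum as B keeps it), B's pointer
-- loop followed by B's finish computes exactly A applied to that segment.
lemma key (lst : List Int) (i j : Int) (h0 : 0 ≤ i) (hij : i ≤ j + 1)
    (hj : j < (lst.length : Int)) :
    pbFinish lst (pbAltLoop lst (PySem.List.slice lst (some i) (some (j + 1))).sum i j).1
      (pbAltLoop lst (PySem.List.slice lst (some i) (some (j + 1))).sum i j).2
      = plastic_balance (PySem.List.slice lst (some i) (some (j + 1))) := by
  by_cases hcase : i < j
  · have hdec := slice_decomp lst i j h0 hcase hj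
    have hL0 : PySem.List.pyGetD (PySem.List.pyGetD lst i 0 ::
        (PySem.List.slice lst (some (i+1)) (some j) ++ [PySem.List.pyGetD lst j 0])) 0 0
        = PySem.List.pyGetD lst i 0 := by
      simp [PySem.List.pyGetD_zero_cons]
    have hL1 : PySem.List.pyGetD (PySem.List.pyGetD lst i 0 ::
        (PySem.List.slice lst (some (i+1)) (some j) ++ [PySem.List.pyGetD lst j 0])) (-1) 0
        = PySem.List.pyGetD lst j 0 := by
      rw [← List.cons_append]; exact PySem.List.pyGetD_neg_one_append_singleton _ _ _
    have hLs : PySem.List.slice (PySem.List.pyGetD lst i 0 ::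
        (PySem.List.slice lst (some (i+1)) (some j) ++ [PySem.List.pyGetD lst j 0]))
        (some 1) (some (-1)) = PySem.List.slice lst (some (i+1)) (some j) := by
      rw [slice_one_neg_one]; simp
    have hsum : (PySem.List.pyGetD lst i 0 ::
        (PySem.List.slice lst (some (i+1)) (some j) ++ [PySem.List.pyGetD lst j 0])).sum
        = PySem.List.pyGetD lst i 0 + (PySem.List.slice lst (some (i+1)) (some j)).sum
          + PySem.List.pyGetD lst j 0 := by
      simp; ring
    rw [hdec]
    by_cases hc : PySem.List.pyGetD lst i 0 + PySem.List.pyGetD lst j 0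
        = (PySem.List.slice lst (some (i+1)) (some j)).sum
    · -- ends equal middle sum: both loops stop, result is the whole segment
      rw [pbAltLoop, dif_neg (fun h => h.2 (by rw [hsum]; omega))]
      rw [pbFinish, if_neg (fun h => absurd h.1 (by omega))]
      rw [hdec]
      simp only [plastic_balance]
      rw [pbTrim, dif_pos (by simp), if_neg (not_not_intro (by rw [hL0, hL1, hLs]; exact hc))]
      rw [if_neg (by simp)]
    · -- ends differ from middle sum: both loops shed the two ends and recurse
      rw [pbAltLoop, dif_pos ⟨hcase, by rw [hsum]; omega⟩]
      have harg : (PySem.List.pyGetD lst i 0 ::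
          (PySem.List.slice lst (some (i+1)) (some j) ++ [PySem.List.pyGetD lst j 0])).sum
          - (PySem.List.pyGetD lst i 0 + PySem.List.pyGetD lst j 0)
          = (PySem.List.slice lst (some (i+1)) (some ((j-1) + 1))).sum := by
        have hjj : (j - 1) + 1 = j := by omega
        rw [hjj, hsum]; ring
      rw [harg, key lst (i+1) (j-1) (by omega) (by omega) (by omega)]
      have hjj : (j - 1) + 1 = j := by omega
      rw [hjj]
      have hstep : pbTrim (PySem.List.pyGetD lst i 0 ::
          (PySem.List.slice lst (some (i+1)) (some j) ++ [PySem.List.pyGetD lst j 0]))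
          = pbTrim (PySem.List.slice lst (some (i+1)) (some j)) := by
        rw [pbTrim, dif_pos (by simp), if_pos (by rw [hL0, hL1, hLs]; exact hc)]
        simp
      simp only [plastic_balance, hstep]
  · by_cases hej : i = j
    · -- singleton segment: A keeps it iff its element doubles to 0, i.e. iff it is 0
      subst hej
      rw [slice_singleton lst i h0 hj]
      rw [pbAltLoop, dif_neg (by simp)]
      simp only [plastic_balance]
      rw [pbTrim, dif_neg (by simp)]
      rw [pbFinish]
      have hx1 : PySem.List.pyGetD [PySem.List.pyGetD lst i 0] 0 0
          = PySem.List.pyGetD lst i 0 := by simp [PySem.List.pyGetD_zero_cons]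
      rw [List.length_singleton, if_pos (rfl : (1:Nat) = 1)]
      by_cases hz : PySem.List.pyGetD lst i 0 = 0
      · rw [if_neg (fun h => h.2 hz), if_neg (not_not_intro (by rw [hx1]; omega))]
        exact slice_singleton lst i h0 hj
      · rw [if_pos ⟨rfl, hz⟩, if_pos (by rw [hx1]; omega)]
        simp
    · -- empty segment: i = j + 1
      have hemp : PySem.List.slice lst (some i) (some (j+1)) = [] := by
        have hieq : i = j + 1 := by omega
        rw [hieq]; exact slice_empty lst (j+1) (by omega)
      rw [hemp, pbAltLoop, dif_neg (fun h => absurd h.1 (by omega))]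
      rw [pbFinish, if_neg (fun h => absurd h.1 (by omega))]
      simp only [plastic_balance]
      rw [pbTrim, dif_neg (by simp)]
      simp [hemp]
termination_by (j + 1 - i).toNat
decreasing_by omega

-- ===== VERDICT (by name: the statement is the Claim_ definition above) =====
theorem plastic_balance_spec : Claim_equal_plastic_balance := by
  intro lst _
  show plastic_balance lst = plastic_balance_alt lst
  have h := key lst 0 ((lst.length : Int) - 1) le_rfl (by omega) (by omega)
  have hs : PySem.List.slice lst (some 0) (some (((lst.length : Int) - 1) + 1)) = lst := by
    have h1 : ((lst.length : Int) - 1) + 1 = (lst.length : Int) := by omega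
    rw [h1]
    simp [PySem.List.slice_zero_start, PySem.List.slice_to]
  rw [hs] at h
  rw [← h]
  simp [plastic_balance_alt, pbFinish]
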